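-- pv_equiv track=rewrite | github.com/katearb/2020-2-level-labs | lab_1/main.py | get_adjacent_words
-- ===== SOURCE A (Python) =====
-- def get_concordance(tokens: list, word: str, left_context_size: int, right_context_size: int) -> list:
--     """
--     Gets a concordance of a word
--     A concordance is a listing of each occurrence of a word in a text,
--     presented with the words surrounding it
--     :param tokens: a list of tokens
--     :param word: a word-base for a concordance
--     :param left_context_size: the number of words in the left context
--     :param right_context_size: the number of words in the right context
--     :return: a concordance
--     e.g. tokens = ['the', 'weather', 'is', 'sunny', 'the', 'man', 'is', 'happy',
--                     'the', 'dog', 'is', 'happy', 'but', 'the', 'cat', 'is', 'sad']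
--     word = 'happy'
--     left_context_size = 2
--     right_context_size = 3
--     --> [['man', 'is', 'happy', 'the', 'dog', 'is'], ['dog', 'is', 'happy', 'but', 'the', 'cat']]
--     """
--     if isinstance(right_context_size, bool) and isinstance(left_context_size, bool):
--         return []
--
--     if isinstance(tokens, list) and isinstance(word, str) and isinstance(right_context_size, int) and isinstance(
--             left_context_size, int):
--         tokens_copy = tokens.copy()
--         inds = []
--
--         count = 0
--         while word in tokens_copy:
--             inds.append(tokens_copy.index(word) + count)
--             tokens_copy.remove(word)
--             count += 1
--
--         if left_context_size > 0 and right_context_size > 0: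
--             return [tokens[i - left_context_size:i + right_context_size + 1] for i in inds]
--         elif left_context_size > 0:
--             return [tokens[i - left_context_size:i + 1] for i in inds]
--         elif right_context_size > 0:
--             return [tokens[i:i + int(right_context_size) + 1] for i in inds]
--
--         return []
--
--     return []
--
-- def get_adjacent_words(tokens: list, word: str, left_n: int, right_n: int) -> list:
--     """
--     Gets adjacent words from the left and right context
--     :param tokens: a list of tokens
--     :param word: a word-base for the search
--     :param left_n: the distance between a word and an adjacent one in the left context
--     :param right_n: the distance between a word and an adjacent one in the right context
--     :return: a list of adjacent words
--     e.g. tokens = ['the', 'weather', 'is', 'sunny', 'the', 'man', 'is', 'happy',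
--                     'the', 'dog', 'is', 'happy', 'but', 'the', 'cat', 'is', 'sad']
--     word = 'happy'
--     left_n = 2
--     right_n = 3
--     --> [['man', 'is'], ['dog, 'cat']]
--     """
--     if isinstance(tokens, list) and isinstance(word, str):
--         if isinstance(left_n, int) and isinstance(right_n, int) and left_n >= 1 and right_n >= 1:
--             concordances = get_concordance(tokens, word, left_n, right_n)
--             adjacent_words = []
--             for c in concordances:
--                 adjacent_words.append([c[0], c[-1]])
--         elif (not isinstance(left_n, int) or left_n < 1) and (isinstance(right_n, int) and right_n >= 1):
--             concordances = get_concordance(tokens, word, left_n, right_n)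
--             adjacent_words = []
--             for c in concordances:
--                 adjacent_words.append([c[-1]])
--         elif (not isinstance(right_n, int) or right_n < 1) and (isinstance(left_n, int) and left_n >= 1):
--             concordances = get_concordance(tokens, word, left_n, -1)
--             adjacent_words = []
--             for c in concordances:
--                 adjacent_words.append([c[0]])
--         else:
--             return []
--
--         return adjacent_words
--
--     else:
--         return []
-- ===== SOURCE B (Python) =====
-- def get_adjacent_words(tokens: list, word: str, left_n: int, right_n: int) -> list:
--     # one forward scan with a moving start index: no copying, no removals
--     occurrences = []
--     start = 0
--     while True:
--         try:
--             start = tokens.index(word, start)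
--         except ValueError:
--             break
--         occurrences.append(start)
--         start += 1
--     if left_n >= 1 and right_n >= 1:
--         result = []
--         for i in occurrences:
--             context = tokens[i - left_n:i + right_n + 1]
--             result.append([context[0], context[-1]])
--         return result
--     if right_n >= 1:
--         last = len(tokens) - 1
--         return [[tokens[min(i + right_n, last)]] for i in occurrences]
--     if left_n >= 1:
--         result = []
--         for i in occurrences:
--             context = tokens[i - left_n:i + 1]
--             result.append([context[0]])
--         return result
--     return []
-- ===== Notes on version B (the rewrite author's own statement) =====
-- stated objective: alternative
-- what changed: B collects the occurrence indices with a single forward index(word, start) scan instead of A's copy-the-list-then-repeated-index/remove loop, and reads the right-context-only neighbour by a direct min-clamped index instead of building a slice.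
import Mathlib
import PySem

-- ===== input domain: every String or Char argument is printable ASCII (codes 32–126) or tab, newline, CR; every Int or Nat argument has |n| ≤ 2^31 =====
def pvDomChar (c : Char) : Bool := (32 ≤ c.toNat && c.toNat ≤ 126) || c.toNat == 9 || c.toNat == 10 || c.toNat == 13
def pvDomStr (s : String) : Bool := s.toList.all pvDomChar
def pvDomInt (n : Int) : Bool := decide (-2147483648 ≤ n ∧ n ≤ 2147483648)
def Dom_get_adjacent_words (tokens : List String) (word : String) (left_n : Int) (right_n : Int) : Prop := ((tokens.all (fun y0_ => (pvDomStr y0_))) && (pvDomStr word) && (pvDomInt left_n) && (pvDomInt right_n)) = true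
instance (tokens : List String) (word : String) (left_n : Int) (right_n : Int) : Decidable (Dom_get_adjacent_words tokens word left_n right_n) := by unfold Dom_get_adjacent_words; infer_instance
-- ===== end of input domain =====

-- B replaces A's copy-then-repeated-index/remove occurrence loop by one forward index(word, start)
-- scan and reads the right-context-only neighbour by a min-clamped direct index (objective: alternative).

-- ===== PORT A =====
-- the 'while word in tokens_copy: inds.append(tokens_copy.index(word) + count); tokens_copy.remove(word); count += 1' loop
-- (under the 'word ∈ copy' guard Python's list.remove removes the first occurrence, i.e. List.erase)
def collectInds (copy : List String) (word : String) (count : Int) : List Int :=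
  if h : word ∈ copy then
    (((PySem.List.index? copy word).getD 0 : Nat) + count) :: collectInds (copy.erase word) word (count + 1)
  else []
termination_by copy.length
decreasing_by have := List.length_erase_add_one h; omega

-- get_concordance; its leading 'isinstance(…, bool)' guard never fires for Int arguments and is omitted
def get_concordance (tokens : List String) (word : String) (left_context_size : Int) (right_context_size : Int) : List (List String) :=
  let inds := collectInds tokens word 0
  if 0 < left_context_size ∧ 0 < right_context_size then
    inds.map (fun i => PySem.List.slice tokens (some (i - left_context_size)) (some (i + right_context_size + 1)))
  else if 0 < left_context_size then
    inds.map (fun i => PySem.List.slice tokens (some (i - left_context_size)) (some (i + 1)))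
  else if 0 < right_context_size then
    inds.map (fun i => PySem.List.slice tokens (some i) (some (i + right_context_size + 1)))
  else []

-- c[0] / c[-1] raise IndexError on an empty c: the 'none' fallback [] is unreachable under Pre_
def get_adjacent_words (tokens : List String) (word : String) (left_n : Int) (right_n : Int) : List (List String) :=
  if 1 ≤ left_n ∧ 1 ≤ right_n then
    (get_concordance tokens word left_n right_n).map (fun c =>
      match PySem.List.pyGet? c 0, PySem.List.pyGet? c (-1) with
      | some a, some b => [a, b]
      | _, _ => [])
  else if left_n < 1 ∧ 1 ≤ right_n then
    (get_concordance tokens word left_n right_n).map (fun c =>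
      match PySem.List.pyGet? c (-1) with
      | some b => [b]
      | none => [])
  else if right_n < 1 ∧ 1 ≤ left_n then
    (get_concordance tokens word left_n (-1)).map (fun c =>
      match PySem.List.pyGet? c 0 with
      | some a => [a]
      | none => [])
  else []

-- ===== PORT B =====
-- the 'while True: start = tokens.index(word, start); occurrences.append(start); start += 1' scan;
-- Python's tokens.index(word, start) is start + first index of word in tokens[start:] (ValueError = none → break)
def occScan (tokens : List String) (word : String) (start : Nat) : List Int :=
  match h : PySem.List.index? (tokens.drop start) word with
  | some j => ((start + j : Nat) : Int) :: occScan tokens word (start + j + 1)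
  | none => []
termination_by tokens.length - start
decreasing_by
  obtain ⟨hk, -, -⟩ := PySem.List.getElem_of_index?_eq_some h
  simp only [List.length_drop] at hk
  omega

def get_adjacent_words_alt (tokens : List String) (word : String) (left_n : Int) (right_n : Int) : List (List String) :=
  let occurrences := occScan tokens word 0
  if 1 ≤ left_n ∧ 1 ≤ right_n then
    occurrences.map (fun i =>
      let context := PySem.List.slice tokens (some (i - left_n)) (some (i + right_n + 1))
      (((PySem.List.pyGet? context 0).bind fun a =>
        (PySem.List.pyGet? context (-1)).map fun b => [a, b])).getD [])
  else if 1 ≤ right_n then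
    occurrences.map (fun i =>
      (PySem.List.pyGet? tokens (min (i + right_n) ((tokens.length : Int) - 1))).toList)
  else if 1 ≤ left_n then
    occurrences.map (fun i =>
      (PySem.List.pyGet? (PySem.List.slice tokens (some (i - left_n)) (some (i + 1))) 0).toList)
  else []

-- ===== PRECONDITION & SPEC =====
-- Pre_ excludes exactly the inputs where Python A raises IndexError (c[0]/c[-1] on an empty context
-- slice): an occurrence of `word` at a position < left_n while the list is long enough that the
-- negatively-wrapped slice tokens[i-left_n:…] comes out empty. B raises there too.
def Pre_get_adjacent_words (tokens : List String) (word : String) (left_n : Int) (right_n : Int) : Prop :=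
  (1 ≤ left_n → 1 ≤ right_n → left_n + right_n + 1 ≤ (tokens.length : Int) → word ∉ tokens.take left_n.toNat)
  ∧ (1 ≤ left_n → right_n < 1 → left_n + 1 ≤ (tokens.length : Int) → word ∉ tokens.take left_n.toNat)
instance (tokens : List String) (word : String) (left_n : Int) (right_n : Int) : Decidable (Pre_get_adjacent_words tokens word left_n right_n) := by unfold Pre_get_adjacent_words; infer_instance

def pvWitness_get_adjacent_words : List String × String × Int × Int := (["a", "x", "b"], "x", 1, 1)

def Spec_get_adjacent_words (tokens : List String) (word : String) (left_n : Int) (right_n : Int) (out : List (List String)) : Prop := out = get_adjacent_words_alt tokens word left_n right_n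
instance (tokens : List String) (word : String) (left_n : Int) (right_n : Int) (out : List (List String)) : Decidable (Spec_get_adjacent_words tokens word left_n right_n out) := by unfold Spec_get_adjacent_words; infer_instance

-- ===== CLAIM (what is proved, stated in full; the proofs are below) =====
def Claim_equal_get_adjacent_words : Prop := ∀ (tokens : List String) (word : String) (left_n : Int) (right_n : Int), Dom_get_adjacent_words tokens word left_n right_n → Pre_get_adjacent_words tokens word left_n right_n → Spec_get_adjacent_words tokens word left_n right_n (get_adjacent_words tokens word left_n right_n)

-- ===== LEMMAS AND PROOFS =====

-- occurrence indices collected from start offset s (occIdx with a shifted enumerate start)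
lemma occIdx_cons (x : String) (xs : List String) (word : String) (s : Int) :
    (PySem.List.enumerate (x :: xs) s).filterMap (fun p => if p.2 = word then some p.1 else none)
      = (if x = word then [s] else [])
        ++ (PySem.List.enumerate xs (s + 1)).filterMap (fun p => if p.2 = word then some p.1 else none) := by
  rw [PySem.List.enumerate_cons]
  by_cases h : x = word <;> simp [h]

lemma occAux_nil_of_not_mem (xs : List String) (word : String) (s : Int) (h : word ∉ xs) :
    (PySem.List.enumerate xs s).filterMap (fun p => if p.2 = word then some p.1 else none) = [] := by
  induction xs generalizing s with
  | nil => simp [PySem.List.enumerate_nil]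
  | cons x xs ih =>
    rw [occIdx_cons]
    have hx : x ≠ word := fun hxw => h (hxw ▸ List.mem_cons_self)
    simp [hx, ih (s + 1) (fun hm => h (List.mem_cons_of_mem _ hm))]

-- removing the first occurrence peels off the head of the occurrence-index list
lemma occAux_erase (xs : List String) (word : String) (j : Nat) (s : Int)
    (hj : PySem.List.index? xs word = some j) :
    (PySem.List.enumerate xs s).filterMap (fun p => if p.2 = word then some p.1 else none)
      = (s + j) :: (PySem.List.enumerate (xs.erase word) (s + 1)).filterMap (fun p => if p.2 = word then some p.1 else none) := by
  induction xs generalizing j s with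
  | nil => simp [PySem.List.index?] at hj
  | cons x xs ih =>
    by_cases hx : x = word
    · rw [hx] at hj ⊢
      rw [PySem.List.index?_cons_self] at hj
      have : j = 0 := by injection hj; omega
      subst this
      rw [occIdx_cons]
      simp [List.erase_cons_head]
    · rw [PySem.List.index?_cons_of_ne xs hx] at hj
      obtain ⟨j', hj', rfl⟩ : ∃ j', PySem.List.index? xs word = some j' ∧ j = j' + 1 := by
        cases h : PySem.List.index? xs word <;> rw [h] at hj <;> simp at hj
        · exact ⟨_, rfl, hj.symm⟩
      have hxw : (x = word) = False := by simp [hx]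
      rw [occIdx_cons, List.erase_cons_tail (by simpa using hx), occIdx_cons]
      simp only [hxw]
      rw [ih j' (s + 1) hj']
      simp only [if_false, List.nil_append]
      congr 1
      push_cast
      ring

-- A's while-loop computes exactly B's one-pass occurrence indices (shifted by the running count)
lemma collectInds_eq_occAux (word : String) (xs : List String) (c : Int) :
    collectInds xs word c
      = (PySem.List.enumerate xs c).filterMap (fun p => if p.2 = word then some p.1 else none) := by
  induction hn : xs.length using Nat.strong_induction_on generalizing xs c with
  | _ n ih =>
    rw [collectInds]
    by_cases h : word ∈ xs
    · obtain ⟨j, hj⟩ := Option.isSome_iff_exists.mp ((PySem.List.index?_isSome_iff xs word).mpr h)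
      rw [occAux_erase xs word j c hj]
      have hlen : (xs.erase word).length < n := by have := List.length_erase_add_one h; omega
      rw [dif_pos h, hj, ih _ hlen (xs.erase word) (c + 1) rfl]
      congr 1
      simp
      ring
    · rw [dif_neg h, occAux_nil_of_not_mem xs word c h]

-- first occurrence peels off the head of the occurrence-index list (drop form, for B's scan)
lemma occAux_first (xs : List String) (word : String) (j : Nat) (s : Int)
    (hj : PySem.List.index? xs word = some j) :
    (PySem.List.enumerate xs s).filterMap (fun p => if p.2 = word then some p.1 else none)
      = (s + j) :: (PySem.List.enumerate (xs.drop (j + 1)) (s + (j : Int) + 1)).filterMap (fun p => if p.2 = word then some p.1 else none) := by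
  induction xs generalizing j s with
  | nil => simp [PySem.List.index?] at hj
  | cons x xs ih =>
    by_cases hx : x = word
    · rw [hx] at hj ⊢
      rw [PySem.List.index?_cons_self] at hj
      have : j = 0 := by injection hj; omega
      subst this
      rw [occIdx_cons]
      simp
    · rw [PySem.List.index?_cons_of_ne xs hx] at hj
      obtain ⟨j', hj', rfl⟩ : ∃ j', PySem.List.index? xs word = some j' ∧ j = j' + 1 := by
        cases h : PySem.List.index? xs word <;> rw [h] at hj <;> simp at hj
        · exact ⟨_, rfl, hj.symm⟩
      have hxw : (x = word) = False := by simp [hx]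
      rw [occIdx_cons]
      simp only [hxw, if_false, List.nil_append]
      rw [ih j' (s + 1) hj']
      have hdrop : (x :: xs).drop (j' + 1 + 1) = xs.drop (j' + 1) := rfl
      rw [hdrop]
      have e : (s : Int) + 1 + (j' : Int) = s + ((j' : Int) + 1) := by ring
      rw [e]
      push_cast
      ring_nf

-- B's index-with-start scan computes the same occurrence-index list
lemma occScan_eq_occAux (tokens : List String) (word : String) (start : Nat) :
    occScan tokens word start
      = (PySem.List.enumerate (tokens.drop start) (start : Int)).filterMap (fun p => if p.2 = word then some p.1 else none) := by
  induction hm : tokens.length - start using Nat.strong_induction_on generalizing start with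
  | _ m ih =>
    rw [occScan]
    split
    · next j h =>
      obtain ⟨hk, -, -⟩ := PySem.List.getElem_of_index?_eq_some h
      simp only [List.length_drop] at hk
      rw [occAux_first _ _ _ _ h]
      rw [ih (tokens.length - (start + j + 1)) (by omega) (start + j + 1) rfl]
      rw [List.drop_drop]
      congr 2
    · next h =>
      rw [occAux_nil_of_not_mem _ _ _ ((PySem.List.index?_eq_none_iff _ _).mp h)]

-- every collected index is a genuine in-range occurrence position
lemma mem_occScan (tokens : List String) (word : String) (i : Int)
    (h : i ∈ occScan tokens word 0) : 0 ≤ i ∧ i < (tokens.length : Int) := by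
  rw [occScan_eq_occAux, List.drop_zero] at h
  rw [List.mem_filterMap] at h
  obtain ⟨p, hp, hpi⟩ := h
  rw [PySem.List.mem_enumerate_iff] at hp
  obtain ⟨k, hk, rfl⟩ := hp
  by_cases hw : tokens[k] = word <;> simp [hw] at hpi
  subst hpi
  constructor <;> [omega; exact_mod_cast hk]

-- last element of the right-context slice = direct min-clamped index
lemma last_slice_eq (tokens : List String) (i r : Int)
    (h0 : 0 ≤ i) (hn : i < (tokens.length : Int)) (hr : 1 ≤ r) :
    PySem.List.pyGet? (PySem.List.slice tokens (some i) (some (i + r + 1))) (-1)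
      = PySem.List.pyGet? tokens (min (i + r) ((tokens.length : Int) - 1)) := by
  have hnn : 0 ≤ i + r + 1 := by omega
  rw [PySem.List.slice_toNat tokens h0 hnn, PySem.List.pyGet?_neg_one,
      PySem.List.pyGet?_of_nonneg tokens (by omega : (0:Int) ≤ min (i + r) ((tokens.length : Int) - 1))]
  have h1 : 1 ≤ (tokens.length : Int) := by omega
  set n := tokens.length with hnd
  set a := i.toNat with had
  have hai : (a : Int) = i := Int.toNat_of_nonneg h0
  have han : a < n := by omega
  have hb : (i + r + 1).toNat = a + (r + 1).toNat := by omega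
  have hrt : 1 ≤ (r + 1).toNat := by omega
  set b := (i + r + 1).toNat - a with hbd
  have hb2 : 1 ≤ b := by omega
  have hlen : ((tokens.drop a).take b).length = min b (n - a) := by
    simp only [List.length_take, List.length_drop]
    omega
  have hne : min b (n - a) - 1 < ((tokens.drop a).take b).length := by omega
  rw [List.getLast?_eq_getElem?]
  rw [hlen]
  have hmin : (min (i + r) ((n : Int) - 1)).toNat = a + (min b (n - a) - 1) := by omega
  rw [hmin]
  rw [List.getElem?_take, if_pos (by omega)]
  rw [List.getElem?_drop]

-- ===== VERDICT (by name: the statement is the Claim_ definition above) =====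
theorem get_adjacent_words_spec : Claim_equal_get_adjacent_words := by
  intro tokens word l r _ _
  unfold Spec_get_adjacent_words get_adjacent_words get_adjacent_words_alt get_concordance
  have hco : collectInds tokens word 0 = occScan tokens word 0 := by
    rw [collectInds_eq_occAux word tokens 0, occScan_eq_occAux, List.drop_zero]
    norm_num
  by_cases h1 : 1 ≤ l ∧ 1 ≤ r
  · rw [if_pos h1, if_pos h1, if_pos ⟨by omega, by omega⟩, hco, List.map_map]
    refine List.map_congr_left fun i _ => ?_
    simp only [Function.comp]
    cases ha : PySem.List.pyGet? (PySem.List.slice tokens (some (i - l)) (some (i + r + 1))) 0 <;>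
      cases hb : PySem.List.pyGet? (PySem.List.slice tokens (some (i - l)) (some (i + r + 1))) (-1) <;>
        simp
  · rw [if_neg h1, if_neg h1]
    by_cases h2 : 1 ≤ r
    · rw [if_pos ⟨by omega, h2⟩, if_pos h2,
          if_neg (by omega : ¬(0 < l ∧ 0 < r)), if_neg (by omega : ¬0 < l), if_pos (by omega : 0 < r),
          hco, List.map_map]
      apply List.map_congr_left
      intro i hi
      obtain ⟨h0, hn⟩ := mem_occScan tokens word i hi
      simp only [Function.comp]
      rw [last_slice_eq tokens i r h0 hn h2]
      cases ha : PySem.List.pyGet? tokens (min (i + r) ((tokens.length : Int) - 1)) <;> simp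
    · by_cases h3 : 1 ≤ l
      · rw [if_neg (by omega : ¬(l < 1 ∧ 1 ≤ r)), if_pos ⟨by omega, h3⟩, if_neg h2, if_pos h3,
            if_neg (by omega : ¬(0 < l ∧ 0 < (-1:Int))), if_pos (by omega : 0 < l), hco, List.map_map]
        refine List.map_congr_left fun i _ => ?_
        simp only [Function.comp]
        cases ha : PySem.List.pyGet? (PySem.List.slice tokens (some (i - l)) (some (i + 1))) 0 <;> simp
      · rw [if_neg (by omega : ¬(l < 1 ∧ 1 ≤ r)), if_neg (by omega : ¬(r < 1 ∧ 1 ≤ l)), if_neg h2, if_neg h3]
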